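-- pv_equiv track=rewrite | github.com/roasoul/nasa-ml-learning | scripts/build_paper_pdf.py | _wrap_longtables_resizebox
-- ===== SOURCE A (Python) =====
-- def _wrap_longtables_resizebox(tex: str) -> str:
--     """Wrap every pandoc longtable in \\resizebox so wide tables shrink to
--     fit \\linewidth. longtable supports paging across pages but not scale-
--     to-fit, so we convert each to a plain tabular inside a table float.
--     """
--     start = 0
--     out = []
--     while True:
--         s = tex.find(r"\begin{longtable}", start)
--         if s == -1:
--             out.append(tex[start:])
--             break
--         e = tex.find(r"\end{longtable}", s)
--         if e == -1:
--             out.append(tex[start:])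
--             break
--         e += len(r"\end{longtable}")
--         block = tex[s:e]
--
--         tab = block
--         # Strip longtable-only commands.
--         for rm in (
--             r"\endfirsthead",
--             r"\endhead",
--             r"\endfoot",
--             r"\endlastfoot",
--             r"\noalign{}",
--         ):
--             tab = tab.replace(rm, "")
--         # Rename environment.
--         tab = tab.replace(r"\begin{longtable}", r"\begin{tabular}")
--         tab = tab.replace(r"\end{longtable}", r"\end{tabular}")
--         # pandoc emits column widths as p{(\linewidth - N\tabcolsep) * \real{0.XX}} —
--         # inside a \resizebox this can misbehave; keep as-is, the resizebox will
--         # scale the final box either way.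
--
--         wrapped = (
--             "\\begin{table}[ht!]\n"
--             "\\centering\\footnotesize\n"
--             "\\resizebox{\\linewidth}{!}{%\n"
--             + tab +
--             "\n}\n"
--             "\\end{table}\n"
--         )
--         out.append(tex[start:s])
--         out.append(wrapped)
--         start = e
--     return "".join(out)
-- ===== SOURCE B (Python) =====
-- def _wrap_longtables_resizebox(tex: str) -> str:
--     """Recursive decomposition: wrap the first longtable and recurse on the rest."""
--     s = tex.find("\\begin{longtable}")
--     if s == -1:
--         return tex
--     e = tex.find("\\end{longtable}", s)
--     if e == -1:
--         return tex
--     e += len("\\end{longtable}")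
--     tab = tex[s:e]
--     for old, new in (
--         ("\\endfirsthead", ""),
--         ("\\endhead", ""),
--         ("\\endfoot", ""),
--         ("\\endlastfoot", ""),
--         ("\\noalign{}", ""),
--         ("\\begin{longtable}", "\\begin{tabular}"),
--         ("\\end{longtable}", "\\end{tabular}"),
--     ):
--         tab = tab.replace(old, new)
--     return (
--         tex[:s]
--         + "\\begin{table}[ht!]\n"
--           "\\centering\\footnotesize\n"
--           "\\resizebox{\\linewidth}{!}{%\n"
--         + tab
--         + "\n}\n"
--           "\\end{table}\n"
--         + _wrap_longtables_resizebox(tex[e:])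
--     )
-- ===== Notes on version B (the rewrite author's own statement) =====
-- stated objective: simpler
-- what changed: Replaces A's while-loop with a moving start index and an out-list joined at the end by a direct recursion on the remaining text (wrap the first complete longtable block, concatenate, recurse on the tail), with the seven fixed .replace() strippings/renames driven by a single data table instead of a hand-written chain.
import Mathlib
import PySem

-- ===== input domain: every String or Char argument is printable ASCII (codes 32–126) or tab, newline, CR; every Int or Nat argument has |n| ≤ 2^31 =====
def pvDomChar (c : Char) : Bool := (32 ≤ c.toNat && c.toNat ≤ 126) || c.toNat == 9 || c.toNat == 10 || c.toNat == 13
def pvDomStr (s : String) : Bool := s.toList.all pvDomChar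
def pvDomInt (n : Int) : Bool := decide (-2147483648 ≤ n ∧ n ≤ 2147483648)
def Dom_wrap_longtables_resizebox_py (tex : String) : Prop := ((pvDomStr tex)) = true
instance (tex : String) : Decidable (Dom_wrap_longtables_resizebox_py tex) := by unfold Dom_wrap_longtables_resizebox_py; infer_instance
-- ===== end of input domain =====

-- B re-implements the longtable wrapper as a direct recursion on the remaining
-- text (find first block, wrap it, recurse on the tail) instead of A's while
-- loop with a moving start index and an out-list accumulator; objective: simpler.

-- shared string literals of both Pythons
def pvBeginLT : List Char := "\\begin{longtable}".toList
def pvEndLT : List Char := "\\end{longtable}".toList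
def pvHdr : List Char :=
  "\\begin{table}[ht!]\n\\centering\\footnotesize\n\\resizebox{\\linewidth}{!}{%\n".toList
def pvFtr : List Char := "\n}\n\\end{table}\n".toList

-- bounds of a successful find, needed by both ports' termination proofs
lemma pvFindFrom_bounds (tex sub : List Char) (k : Nat) (h : PySem.Chars.findFrom tex sub (k : Int) ≠ -1) :
    (k : Int) ≤ PySem.Chars.findFrom tex sub (k : Int) ∧
    (PySem.Chars.findFrom tex sub (k : Int)).toNat + sub.length ≤ tex.length ∧ k ≤ tex.length := by
  by_cases hk : k ≤ tex.length
  · have heq := PySem.Chars.findFrom_natCast tex sub k hk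
    set g := PySem.Chars.find (List.drop k tex) sub with hg
    have hgne : g ≠ -1 := by intro hc; rw [heq, if_pos hc] at h; exact h rfl
    rw [heq, if_neg hgne] at h ⊢
    have hg0 : 0 ≤ g := by have := PySem.Chars.neg_one_le_find (List.drop k tex) sub; omega
    have hgl : g ≤ ((tex.length - k : Nat) : Int) := by
      have := PySem.Chars.find_le_length (List.drop k tex) sub
      simpa [List.length_drop] using this
    obtain ⟨hpre, -⟩ := PySem.Chars.find_spec (s := List.drop k tex) (sub := sub) hg0
    have hlen : sub.length ≤ (List.drop g.toNat (List.drop k tex)).length := hpre.length_le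
    simp only [List.length_drop] at hlen
    exact ⟨by omega, by omega, hk⟩
  · exfalso; apply h
    simp only [PySem.Chars.findFrom]
    have h1 : (tex.length : Int) < (k : Int) := by exact_mod_cast Nat.lt_of_not_le hk
    rw [if_neg (show ¬((k : Int) < 0) by omega)]
    rw [if_pos h1]

-- ===== PORT A =====
-- the 'for rm in (...)' strip loop followed by the two environment renames
def pvTabOfBlockA (block : List Char) : List Char :=
  let tab := (["\\endfirsthead".toList, "\\endhead".toList, "\\endfoot".toList,
      "\\endlastfoot".toList, "\\noalign{}".toList]).foldl
      (fun t rm => PySem.Chars.replace t rm []) block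
  let tab := PySem.Chars.replace tab pvBeginLT "\\begin{tabular}".toList
  PySem.Chars.replace tab pvEndLT "\\end{tabular}".toList

-- the 'while True' loop; state = (start, out); Python's start is a nonnegative int
def wrapALoop (tex : List Char) (start : Nat) (out : List (List Char)) : List (List Char) :=
  let s := PySem.Chars.findFrom tex pvBeginLT (start : Int)
  if _hs : s = -1 then out ++ [PySem.Chars.slice tex (some (start : Int)) none]
  else
    let e := PySem.Chars.findFrom tex pvEndLT s
    if _he : e = -1 then out ++ [PySem.Chars.slice tex (some (start : Int)) none]
    else
      let e2 := e + (pvEndLT.length : Int)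
      let block := PySem.Chars.slice tex (some s) (some e2)
      wrapALoop tex e2.toNat
        (out ++ [PySem.Chars.slice tex (some (start : Int)) (some s),
                 pvHdr ++ pvTabOfBlockA block ++ pvFtr])
termination_by tex.length + 1 - start
decreasing_by
  have hs' : PySem.Chars.findFrom tex pvBeginLT (start : Int) ≠ -1 := _hs
  have he' : PySem.Chars.findFrom tex pvEndLT (PySem.Chars.findFrom tex pvBeginLT (start : Int)) ≠ -1 := _he
  have h1 := pvFindFrom_bounds tex pvBeginLT start hs'
  have h2 : (0 : Int) ≤ PySem.Chars.findFrom tex pvBeginLT (start : Int) := le_trans (by positivity) h1.1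
  obtain ⟨sn, hsn⟩ := Int.eq_ofNat_of_zero_le h2
  rw [hsn] at he' ⊢
  have h3 := pvFindFrom_bounds tex pvEndLT sn he'
  have h4 : (0 : Int) ≤ PySem.Chars.findFrom tex pvEndLT (sn : Int) := le_trans (by positivity) h3.1
  obtain ⟨en, hen⟩ := Int.eq_ofNat_of_zero_le h4
  rw [hen]
  have h6 : en + pvEndLT.length ≤ tex.length := by have := h3.2.1; rw [hen] at this; simpa using this
  have h8 : pvEndLT.length = 15 := rfl
  have h9 : ((en : Int) + (pvEndLT.length : Int)).toNat = en + 15 := by rw [h8]; omega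
  rw [h9]
  omega

def wrap_longtables_resizebox_py (tex : String) : String :=
  String.ofList (PySem.Chars.join [] (wrapALoop tex.toList 0 []))

-- ===== PORT B =====
-- B's table of (old, new) replacement pairs
def pvReplsB : List (List Char × List Char) :=
  [("\\endfirsthead".toList, []), ("\\endhead".toList, []), ("\\endfoot".toList, []),
   ("\\endlastfoot".toList, []), ("\\noalign{}".toList, []),
   (pvBeginLT, "\\begin{tabular}".toList), (pvEndLT, "\\end{tabular}".toList)]

-- B: wrap the first longtable block, recurse on the text after it
def wrapBRec (tex : List Char) : List Char :=
  let s := PySem.Chars.find tex pvBeginLT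
  if _hs : s = -1 then tex
  else
    let e := PySem.Chars.findFrom tex pvEndLT s
    if _he : e = -1 then tex
    else
      let e2 := e + (pvEndLT.length : Int)
      let tab := pvReplsB.foldl (fun t p => PySem.Chars.replace t p.1 p.2)
        (PySem.Chars.slice tex (some s) (some e2))
      PySem.Chars.slice tex none (some s) ++ pvHdr ++ tab ++ pvFtr
        ++ wrapBRec (PySem.Chars.slice tex (some e2) none)
termination_by tex.length
decreasing_by
  have hfz : PySem.Chars.find tex pvBeginLT = PySem.Chars.findFrom tex pvBeginLT ((0 : Nat) : Int) := by
    simp [PySem.Chars.findFrom_zero]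
  have hs' : PySem.Chars.findFrom tex pvBeginLT ((0 : Nat) : Int) ≠ -1 := hfz ▸ _hs
  have he' : PySem.Chars.findFrom tex pvEndLT (PySem.Chars.find tex pvBeginLT) ≠ -1 := _he
  rw [hfz] at he'
  have h1 := pvFindFrom_bounds tex pvBeginLT 0 hs'
  have h2 : (0 : Int) ≤ PySem.Chars.findFrom tex pvBeginLT ((0 : Nat) : Int) := le_trans (by positivity) h1.1
  obtain ⟨sn, hsn⟩ := Int.eq_ofNat_of_zero_le h2
  have hs17 : sn + pvBeginLT.length ≤ tex.length := by have := h1.2.1; rw [hsn] at this; simpa using this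
  rw [hsn] at he'
  rw [hfz, hsn]
  have h3 := pvFindFrom_bounds tex pvEndLT sn he'
  have h4 : (0 : Int) ≤ PySem.Chars.findFrom tex pvEndLT (sn : Int) := le_trans (by positivity) h3.1
  obtain ⟨en, hen⟩ := Int.eq_ofNat_of_zero_le h4
  rw [hen]
  have h6 : en + pvEndLT.length ≤ tex.length := by have := h3.2.1; rw [hen] at this; simpa using this
  have h8 : pvEndLT.length = 15 := rfl
  have h9 : (en : Int) + (pvEndLT.length : Int) = ((en + 15 : Nat) : Int) := by rw [h8]; push_cast; ring
  rw [h9]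
  simp only [PySem.Chars.slice_eq_listSlice, PySem.List.slice_from_natCast]
  simp only [List.length_drop]
  omega

def wrap_longtables_resizebox_py_alt (tex : String) : String :=
  String.ofList (wrapBRec tex.toList)

-- ===== PRECONDITION & SPEC =====
def Spec_wrap_longtables_resizebox_py (tex : String) (out : String) : Prop := out = wrap_longtables_resizebox_py_alt tex
instance (tex : String) (out : String) : Decidable (Spec_wrap_longtables_resizebox_py tex out) := by unfold Spec_wrap_longtables_resizebox_py; infer_instance

-- ===== CLAIM (what is proved, stated in full; the proofs are below) =====
def Claim_equal_wrap_longtables_resizebox_py : Prop := ∀ (tex : String), Dom_wrap_longtables_resizebox_py tex → Spec_wrap_longtables_resizebox_py tex (wrap_longtables_resizebox_py tex)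

-- ===== LEMMAS AND PROOFS =====

lemma pvJoin_nil (parts : List (List Char)) : PySem.Chars.join [] parts = parts.flatten := by
  unfold PySem.Chars.join
  induction parts with
  | nil => rfl
  | cons h t ih =>
    cases t with
    | nil => simp [List.intercalate]
    | cons a b => simp_all [List.intercalate, List.intersperse]

-- A's replacement chain and B's fold over pvReplsB are the same function
lemma pvTab_eq (block : List Char) :
    pvTabOfBlockA block
      = pvReplsB.foldl (fun t p => PySem.Chars.replace t p.1 p.2) block := rfl

-- the loop invariant: A's loop from 'start' produces join(out) ++ B(tex[start:])
lemma pvMain (tex : List Char) (start : Nat) (out : List (List Char))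
    (h : start ≤ tex.length) :
    (wrapALoop tex start out).flatten = out.flatten ++ wrapBRec (tex.drop start) := by
  revert h
  induction start, out using wrapALoop.induct tex with
  | case1 start out _s hs0 =>
    intro h
    have hs : PySem.Chars.findFrom tex pvBeginLT (start : Int) = -1 := hs0
    have hfa := PySem.Chars.findFrom_natCast tex pvBeginLT start h
    rw [hfa] at hs
    have hf1 : PySem.Chars.find (List.drop start tex) pvBeginLT = -1 := by
      by_contra hc
      rw [if_neg hc] at hs
      have := PySem.Chars.neg_one_le_find (List.drop start tex) pvBeginLT
      omega
    rw [wrapALoop, hfa, wrapBRec]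
    simp [hf1, PySem.Chars.slice_eq_listSlice, PySem.List.slice_from_natCast]
  | case2 start out _s hs0 _e he0 =>
    intro h
    have hs : PySem.Chars.findFrom tex pvBeginLT (start : Int) ≠ -1 := hs0
    have he : PySem.Chars.findFrom tex pvEndLT (PySem.Chars.findFrom tex pvBeginLT (start : Int)) = -1 := he0
    have hfa := PySem.Chars.findFrom_natCast tex pvBeginLT start h
    have hf1ne : PySem.Chars.find (List.drop start tex) pvBeginLT ≠ -1 := by
      intro hc; rw [hfa, if_pos hc] at hs; exact hs rfl
    have hf0 : 0 ≤ PySem.Chars.find (List.drop start tex) pvBeginLT := by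
      have := PySem.Chars.neg_one_le_find (List.drop start tex) pvBeginLT; omega
    obtain ⟨fn, hfn⟩ := Int.eq_ofNat_of_zero_le hf0
    have hfle : fn ≤ tex.length - start := by
      have := PySem.Chars.find_le_length (List.drop start tex) pvBeginLT
      rw [hfn, List.length_drop] at this; exact_mod_cast this
    have hsval : PySem.Chars.findFrom tex pvBeginLT (start : Int) = ((start + fn : Nat) : Int) := by
      rw [hfa, if_neg hf1ne, hfn]; push_cast; ring
    have hsum : start + fn ≤ tex.length := by omega
    have hfb := PySem.Chars.findFrom_natCast tex pvEndLT (start + fn) hsum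
    have he2 := he
    rw [hsval, hfb] at he2
    have hdd : List.drop (start + fn) tex = List.drop fn (List.drop start tex) := by
      rw [List.drop_drop]
    rw [hdd] at he2
    have hg1 : PySem.Chars.find (List.drop fn (List.drop start tex)) pvEndLT = -1 := by
      by_contra hc
      rw [if_neg hc] at he2
      have := PySem.Chars.neg_one_le_find (List.drop fn (List.drop start tex)) pvEndLT; omega
    have hfnlen : fn ≤ (List.drop start tex).length := by rw [List.length_drop]; omega
    have heB : PySem.Chars.findFrom (List.drop start tex) pvEndLT
        (PySem.Chars.find (List.drop start tex) pvBeginLT) = -1 := by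
      rw [hfn, PySem.Chars.findFrom_natCast (List.drop start tex) pvEndLT fn hfnlen, if_pos hg1]
    rw [wrapALoop, dif_neg hs, dif_pos he, wrapBRec, dif_neg hf1ne, dif_pos heB]
    simp [PySem.Chars.slice_eq_listSlice, PySem.List.slice_from_natCast]
  | case3 start out _s hs0 _e he0 _e2 _block ih =>
    intro h
    have hs : PySem.Chars.findFrom tex pvBeginLT (start : Int) ≠ -1 := hs0
    have he : PySem.Chars.findFrom tex pvEndLT (PySem.Chars.findFrom tex pvBeginLT (start : Int)) ≠ -1 := he0
    have hfa := PySem.Chars.findFrom_natCast tex pvBeginLT start h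
    have hf1ne : PySem.Chars.find (List.drop start tex) pvBeginLT ≠ -1 := by
      intro hc; rw [hfa, if_pos hc] at hs; exact hs rfl
    have hf0 : 0 ≤ PySem.Chars.find (List.drop start tex) pvBeginLT := by
      have := PySem.Chars.neg_one_le_find (List.drop start tex) pvBeginLT; omega
    obtain ⟨fn, hfn⟩ := Int.eq_ofNat_of_zero_le hf0
    have hfle : fn ≤ tex.length - start := by
      have := PySem.Chars.find_le_length (List.drop start tex) pvBeginLT
      rw [hfn, List.length_drop] at this; exact_mod_cast this
    have hsval : PySem.Chars.findFrom tex pvBeginLT (start : Int) = ((start + fn : Nat) : Int) := by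
      rw [hfa, if_neg hf1ne, hfn]; push_cast; ring
    have hsum : start + fn ≤ tex.length := by omega
    have hfb := PySem.Chars.findFrom_natCast tex pvEndLT (start + fn) hsum
    have hdd : List.drop (start + fn) tex = List.drop fn (List.drop start tex) := by
      rw [List.drop_drop]
    have he2 := he
    rw [hsval, hfb, hdd] at he2
    have hg1ne : PySem.Chars.find (List.drop fn (List.drop start tex)) pvEndLT ≠ -1 := by
      intro hc; rw [if_pos hc] at he2; exact he2 rfl
    have hg0 : 0 ≤ PySem.Chars.find (List.drop fn (List.drop start tex)) pvEndLT := by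
      have := PySem.Chars.neg_one_le_find (List.drop fn (List.drop start tex)) pvEndLT; omega
    obtain ⟨gn, hgn⟩ := Int.eq_ofNat_of_zero_le hg0
    -- the closing pattern fits: 15 more chars after start+fn+gn
    obtain ⟨hpre, -⟩ := PySem.Chars.find_spec (s := List.drop fn (List.drop start tex)) (sub := pvEndLT) hg0
    have hlenp : pvEndLT.length ≤ (List.drop (PySem.Chars.find (List.drop fn (List.drop start tex)) pvEndLT).toNat
        (List.drop fn (List.drop start tex))).length := hpre.length_le
    rw [hgn] at hlenp
    simp only [List.length_drop, Int.toNat_natCast, show pvEndLT.length = 15 from rfl] at hlenp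
    have hbig : start + fn + gn + 15 ≤ tex.length := by omega
    have heval : PySem.Chars.findFrom tex pvEndLT (PySem.Chars.findFrom tex pvBeginLT (start : Int))
        = ((start + fn + gn : Nat) : Int) := by
      rw [hsval, hfb, hdd, if_neg hg1ne, hgn]; push_cast; ring
    have he2val : PySem.Chars.findFrom tex pvEndLT (PySem.Chars.findFrom tex pvBeginLT (start : Int))
        + (pvEndLT.length : Int) = ((start + fn + gn + 15 : Nat) : Int) := by
      rw [heval, show pvEndLT.length = 15 from rfl]; push_cast; ring
    -- B-side values on rest := tex.drop start
    have hfnlen : fn ≤ (List.drop start tex).length := by rw [List.length_drop]; omega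
    have heBval : PySem.Chars.findFrom (List.drop start tex) pvEndLT
        (PySem.Chars.find (List.drop start tex) pvBeginLT) = ((fn + gn : Nat) : Int) := by
      rw [hfn, PySem.Chars.findFrom_natCast (List.drop start tex) pvEndLT fn hfnlen, if_neg hg1ne, hgn]
      push_cast; ring
    have heBne : PySem.Chars.findFrom (List.drop start tex) pvEndLT
        (PySem.Chars.find (List.drop start tex) pvBeginLT) ≠ -1 := by
      rw [heBval]; omega
    have heB2val : PySem.Chars.findFrom (List.drop start tex) pvEndLT
        (PySem.Chars.find (List.drop start tex) pvBeginLT) + (pvEndLT.length : Int)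
        = ((fn + gn + 15 : Nat) : Int) := by
      rw [heBval, show pvEndLT.length = 15 from rfl]; push_cast; ring
    -- make the IH explicit
    have hS : _s = ((start + fn : Nat) : Int) := hsval
    have hE2 : _e2 = ((start + fn + gn + 15 : Nat) : Int) := he2val
    have hB : _block = PySem.Chars.slice tex (some ((start + fn : Nat) : Int))
        (some ((start + fn + gn + 15 : Nat) : Int)) := by
      show PySem.Chars.slice tex (some _s) (some _e2) = _
      rw [hS, hE2]
    rw [hB, hS, hE2] at ih
    rw [Int.toNat_natCast] at ih
    have ih' := ih (by omega)
    -- unfold one step of A and of B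
    rw [wrapALoop, dif_neg hs, dif_neg he, wrapBRec, dif_neg hf1ne, dif_neg heBne]
    have heval' : PySem.Chars.findFrom tex pvEndLT ((start + fn : Nat) : Int)
        = ((start + fn + gn : Nat) : Int) := by
      rw [hfb, hdd, if_neg hg1ne, hgn]; push_cast; ring
    have he2val' : PySem.Chars.findFrom tex pvEndLT ((start + fn : Nat) : Int)
        + (pvEndLT.length : Int) = ((start + fn + gn + 15 : Nat) : Int) := by
      rw [heval', show pvEndLT.length = 15 from rfl]; push_cast; ring
    have heBval' : PySem.Chars.findFrom (List.drop start tex) pvEndLT ((fn : Nat) : Int)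
        = ((fn + gn : Nat) : Int) := by
      rw [PySem.Chars.findFrom_natCast (List.drop start tex) pvEndLT fn hfnlen, if_neg hg1ne, hgn]
      push_cast; ring
    have heB2val' : PySem.Chars.findFrom (List.drop start tex) pvEndLT ((fn : Nat) : Int)
        + (pvEndLT.length : Int) = ((fn + gn + 15 : Nat) : Int) := by
      rw [heBval', show pvEndLT.length = 15 from rfl]; push_cast; ring
    simp only [hsval, hfn, he2val', heB2val', Int.toNat_natCast]
    rw [ih']
    have hp1 : PySem.Chars.slice tex (some ((start : Nat) : Int)) (some ((start + fn : Nat) : Int))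
        = List.take fn (List.drop start tex) := by
      simp only [PySem.Chars.slice_eq_listSlice, PySem.List.slice_natCast, Nat.add_sub_cancel_left]
    have hp2 : PySem.Chars.slice tex (some ((start + fn : Nat) : Int))
          (some ((start + fn + gn + 15 : Nat) : Int))
        = PySem.Chars.slice (List.drop start tex) (some ((fn : Nat) : Int))
          (some ((fn + gn + 15 : Nat) : Int)) := by
      simp only [PySem.Chars.slice_eq_listSlice, PySem.List.slice_natCast, List.drop_drop]
      congr 1
      omega
    have hp3 : PySem.Chars.slice (List.drop start tex) (some ((fn + gn + 15 : Nat) : Int)) none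
        = List.drop (start + fn + gn + 15) tex := by
      simp only [PySem.Chars.slice_eq_listSlice, PySem.List.slice_from_natCast, List.drop_drop]
      congr 1
      omega
    have hp4 : PySem.Chars.slice (List.drop start tex) none (some ((fn : Nat) : Int))
        = List.take fn (List.drop start tex) := by
      simp only [PySem.Chars.slice_eq_listSlice, PySem.List.slice_to_natCast]
    simp only [pvTab_eq, hp1, hp2, hp3, hp4, List.flatten_append, List.flatten_cons,
      List.flatten_nil, List.append_assoc, List.append_nil]

-- ===== VERDICT (by name: the statement is the Claim_ definition above) =====
theorem wrap_longtables_resizebox_py_spec : Claim_equal_wrap_longtables_resizebox_py := by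
  intro tex _
  unfold Spec_wrap_longtables_resizebox_py wrap_longtables_resizebox_py wrap_longtables_resizebox_py_alt
  rw [pvJoin_nil, pvMain tex.toList 0 [] (by omega)]
  rfl
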